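-- pv_equiv track=rewrite | github.com/Moumitatata/CSE221 | Assignment 3/task2.py | special_inversion_counter
-- ===== SOURCE A (Python) =====
-- def special_inversion_counter(array):
--     def sort_and_count(start, end):
--         if end - start <= 1:
--             return 0
--         middle = (start + end) // 2
--         inversions = sort_and_count(start, middle) + sort_and_count(middle, end)
--         squared_right = sorted([array[k] ** 2 for k in range(middle, end)])
--
--         for left_idx in range(start, middle):
--             low, high = 0, len(squared_right)
--             while low < high:
--                 mid = (low + high) // 2
--                 if array[left_idx] > squared_right[mid]:
--                     low = mid + 1
--                 else:
--                     high = mid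
--             inversions += low
--
--         array[start:end] = sorted(array[start:end])
--         return inversions
--
--     return sort_and_count(0, len(array))
-- ===== SOURCE B (Python) =====
-- def special_inversion_counter(array):
--     count = 0
--     seen = []  # values seen so far, kept sorted
--     for x in array:
--         q = x * x
--         lo, hi = 0, len(seen)
--         while lo < hi:
--             mid = (lo + hi) // 2
--             if seen[mid] <= q:
--                 lo = mid + 1
--             else:
--                 hi = mid
--         count += len(seen) - lo
--         lo, hi = 0, len(seen)
--         while lo < hi:
--             mid = (lo + hi) // 2
--             if seen[mid] <= x:
--                 lo = mid + 1
--             else: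
--                 hi = mid
--         seen.insert(lo, x)
--     return count
-- ===== Notes on version B (the rewrite author's own statement) =====
-- stated objective: alternative
-- what changed: Replaced the recursive in-place merge-sort divide-and-conquer by a single left-to-right pass that keeps the values seen so far in one sorted list and, per element, binary-searches it to count the earlier values greater than the element's square (and B does not mutate the input list, while A sorts it in place).
import Mathlib
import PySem

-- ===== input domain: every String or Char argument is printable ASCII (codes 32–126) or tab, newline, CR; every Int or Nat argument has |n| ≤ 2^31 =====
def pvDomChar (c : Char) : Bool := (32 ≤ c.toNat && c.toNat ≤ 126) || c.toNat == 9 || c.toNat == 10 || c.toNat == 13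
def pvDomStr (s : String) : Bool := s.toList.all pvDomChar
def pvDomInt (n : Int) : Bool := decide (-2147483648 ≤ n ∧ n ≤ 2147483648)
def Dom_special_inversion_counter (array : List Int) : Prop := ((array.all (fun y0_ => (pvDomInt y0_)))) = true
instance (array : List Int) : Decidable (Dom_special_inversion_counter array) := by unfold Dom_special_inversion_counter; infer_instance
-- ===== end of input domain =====

-- B replaces A's in-place merge-sort divide-and-conquer by a single pass that keeps the values
-- seen so far in one sorted list and binary-searches it per element (an alternative algorithm);
-- A sorts the caller's list in place, B does not — the equivalence proved here is about the
-- return value only.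

-- ===== PORT A =====
-- Python's inner `while low < high` binary search; `fuel` only bounds the number of loop
-- iterations (high - low suffices, each step shrinks the interval), it changes no value;
-- squared_right[mid] is always in range (0 ≤ low ≤ mid < high ≤ len), so `getD … 0` is exact there.
def pyBisect : Nat → List Int → Int → Nat → Nat → Nat
  | 0, _, _, low, _ => low
  | fuel + 1, l, x, low, high =>
    if low < high then
      -- mid = (low + high) // 2, written inline
      if x > l.getD ((low + high) / 2) 0 then pyBisect fuel l x ((low + high) / 2 + 1) high
      else pyBisect fuel l x low ((low + high) / 2)
    else low

-- squared_right = sorted([array[k] ** 2 for k in range(middle, end)]) of the right segment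
def sacSq (b2 : List Int) : List Int :=
  PySem.List.sorted (b2.map (fun y => y ^ 2)) (fun z => z) false

-- the body of sort_and_count after the two recursive calls: `a`/`b` are their results
-- (inversions-so-far, sorted segment); the for-loop is the foldl, then array[start:end] = sorted(...)
def sacCombine (a b : Int × List Int) : Int × List Int :=
  (a.2.foldl
     (fun acc x => acc + (pyBisect (sacSq b.2).length (sacSq b.2) x 0 (sacSq b.2).length : Int))
     (a.1 + b.1),
   PySem.List.sorted (a.2 ++ b.2) (fun z => z) false)

-- `sort_and_count(start, end)` works on the segment array[start:end] of the mutated array; the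
-- pure port passes that segment as a list and returns (inversions, its sorted contents); `fuel`
-- only bounds the recursion depth (the segment length suffices: both halves are strictly shorter).
def sortAndCount : Nat → List Int → Int × List Int
  | 0, l => (0, l)
  | fuel + 1, l =>
    if l.length ≤ 1 then (0, l)
    else sacCombine (sortAndCount fuel (l.take (l.length / 2)))
                    (sortAndCount fuel (l.drop (l.length / 2)))

def special_inversion_counter (array : List Int) : Int :=
  (sortAndCount array.length array).1

-- ===== PORT B =====
-- B's `while lo < hi` binary search (both loops of Source B are this same code, once with key x*x,
-- once with key x); `fuel` only bounds the iteration count (hi - lo suffices), it changes no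
-- value; seen[mid] is always in range (0 ≤ lo ≤ mid < hi ≤ len), so `getD … 0` is exact there.
def bSearchLE : Nat → List Int → Int → Nat → Nat → Nat
  | 0, _, _, lo, _ => lo
  | fuel + 1, seen, key, lo, hi =>
    if lo < hi then
      -- mid = (lo + hi) // 2, written inline
      if seen.getD ((lo + hi) / 2) 0 ≤ key then bSearchLE fuel seen key ((lo + hi) / 2 + 1) hi
      else bSearchLE fuel seen key lo ((lo + hi) / 2)
    else lo

def special_inversion_counter_alt (array : List Int) : Int :=
  (array.foldl
    (fun (st : Int × List Int) x =>
      (st.1 + ((st.2.length - bSearchLE st.2.length st.2 (x * x) 0 st.2.length : Nat) : Int),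
       PySem.List.insert st.2 ((bSearchLE st.2.length st.2 x 0 st.2.length : Nat) : Int) x))
    ((0 : Int), ([] : List Int))).1

-- ===== PRECONDITION & SPEC =====
def Spec_special_inversion_counter (array : List Int) (out : Int) : Prop := out = special_inversion_counter_alt array
instance (array : List Int) (out : Int) : Decidable (Spec_special_inversion_counter array out) := by unfold Spec_special_inversion_counter; infer_instance

-- ===== CLAIM (what is proved, stated in full; the proofs are below) =====
def Claim_equal_special_inversion_counter : Prop := ∀ (array : List Int), Dom_special_inversion_counter array → Spec_special_inversion_counter array (special_inversion_counter array)

-- ===== LEMMAS AND PROOFS =====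

-- number of pairs i < j with l[i] > l[j]^2 (the common specification of both programs)
def pc : List Int → Int
  | [] => 0
  | x :: t => (t.countP (fun z => decide (x > z * z)) : Int) + pc t

-- cross pairs: for each x of L, the elements y of R with x > y*y
def crossAB (L R : List Int) : Int :=
  (L.map (fun x => (R.countP (fun y => decide (x > y * y)) : Int))).sum

lemma countP_eq_of_index_split (l : List Int) (p : Int → Bool) (k : Nat) (hk : k ≤ l.length)
    (h : ∀ i (hi : i < l.length), p l[i] = true ↔ i < k) : l.countP p = k := by
  induction l generalizing k with
  | nil => simp at hk ⊢; omega
  | cons a t ih =>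
    have h0 := h 0 (by simp)
    cases k with
    | zero =>
      have hpa : p a = false := by
        simp only [List.getElem_cons_zero] at h0
        rcases hb : p a with _ | _
        · rfl
        · exact absurd (h0.mp hb) (by omega)
      have ht : t.countP p = 0 := by
        apply ih 0 (by omega)
        intro i hi
        have := h (i + 1) (by simp; omega)
        simpa using this
      simp [hpa, ht]
    | succ k' =>
      have hpa : p a = true := by
        simp only [List.getElem_cons_zero] at h0
        exact h0.mpr (by omega)
      have ht : t.countP p = k' := by
        apply ih k' (by simp at hk; omega)
        intro i hi
        have := h (i + 1) (by simp; omega)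
        simpa [Nat.succ_lt_succ_iff] using this
      simp [hpa, ht]

lemma bisect_exit (l : List Int) (x : Int) (k : Nat) (hk : k ≤ l.length)
    (hlo : ∀ i (hi : i < l.length), i < k → l[i] < x)
    (hhi : ∀ i (hi : i < l.length), k ≤ i → ¬ l[i] < x) :
    k = l.countP (fun y => decide (y < x)) := by
  symm
  apply countP_eq_of_index_split _ _ _ hk
  intro i hi
  simp only [decide_eq_true_iff]
  constructor
  · intro hp
    by_contra hik
    exact hhi i hi (by omega) hp
  · exact hlo i hi

lemma pyBisect_spec_aux (l : List Int) (x : Int) (hs : l.Pairwise (· ≤ ·)) :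
    ∀ (n low high : Nat), high - low ≤ n → low ≤ high → high ≤ l.length →
    (∀ i (hi : i < l.length), i < low → l[i] < x) →
    (∀ i (hi : i < l.length), high ≤ i → ¬ l[i] < x) →
    pyBisect n l x low high = l.countP (fun y => decide (y < x)) := by
  intro n
  induction n with
  | zero =>
    intro low high hf h1 h2 hlo hhi
    have heq : low = high := by omega
    exact bisect_exit l x low (by omega) hlo (heq ▸ hhi)
  | succ n ih =>
    intro low high hf h1 h2 hlo hhi
    by_cases hlt : low < high
    · rw [pyBisect, if_pos hlt]
      have hmid : (low + high) / 2 < l.length := by omega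
      rw [List.getD_eq_getElem l 0 hmid]
      by_cases hcmp : x > l[(low + high) / 2]
      · rw [if_pos hcmp]
        apply ih ((low + high) / 2 + 1) high (by omega) (by omega) h2 ?_ hhi
        intro i hi hilt
        rcases Nat.lt_or_ge i ((low + high) / 2) with hc | hc
        · exact lt_of_le_of_lt (List.pairwise_iff_getElem.mp hs i _ hi hmid hc) hcmp
        · have : i = (low + high) / 2 := by omega
          subst this; exact hcmp
      · rw [if_neg hcmp]
        apply ih low ((low + high) / 2) (by omega) (by omega) (by omega) hlo ?_
        intro i hi hge
        rcases Nat.lt_or_ge ((low + high) / 2) i with hc | hc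
        · have := List.pairwise_iff_getElem.mp hs ((low + high) / 2) i hmid hi hc
          omega
        · have : i = (low + high) / 2 := by omega
          subst this; omega
    · rw [pyBisect, if_neg hlt]
      have heq : low = high := by omega
      exact bisect_exit l x low (by omega) hlo (heq ▸ hhi)

lemma pyBisect_spec (l : List Int) (x : Int)
    (hs : l.Pairwise (· ≤ ·)) :
    pyBisect l.length l x 0 l.length = l.countP (fun y => decide (y < x)) := by
  apply pyBisect_spec_aux l x hs l.length 0 l.length (by omega) (by omega) (by omega)
  · intro i hi h; omega
  · intro i hi h; omega

lemma pc_append (L R : List Int) : pc (L ++ R) = pc L + pc R + crossAB L R := by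
  induction L with
  | nil => simp [pc, crossAB]
  | cons a L ih =>
    simp only [List.cons_append, pc, List.countP_append, ih, crossAB, List.map_cons,
      List.sum_cons]
    push_cast
    ring

lemma pc_small (l : List Int) (h : l.length ≤ 1) : pc l = 0 := by
  match l with
  | [] => rfl
  | [a] => simp [pc]
  | a :: b :: t => simp at h

lemma sacCombine_spec (a b : Int × List Int) (L R : List Int)
    (ha2 : a.2.Perm L) (ha1 : a.1 = pc L) (hb2 : b.2.Perm R) (hb1 : b.1 = pc R) :
    (sacCombine a b).2.Perm (L ++ R) ∧ (sacCombine a b).1 = pc (L ++ R) := by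
  constructor
  · exact (PySem.List.sorted_perm _ _ _).trans (ha2.append hb2)
  · show List.foldl
        (fun acc x => acc + ((pyBisect (sacSq b.2).length (sacSq b.2) x 0 (sacSq b.2).length : Nat) : Int))
        (a.1 + b.1) a.2 = pc (L ++ R)
    rw [PySem.List.foldl_add]
    have hkey : ∀ x : Int,
        ((pyBisect (sacSq b.2).length (sacSq b.2) x 0 (sacSq b.2).length : Nat) : Int)
          = (R.countP (fun y => decide (x > y * y)) : Int) := by
      intro x
      have hsorted : (sacSq b.2).Pairwise (· ≤ ·) := by
        simpa using PySem.List.sorted_pairwise (b.2.map (fun y => y ^ 2)) (fun z => z)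
      rw [pyBisect_spec _ x hsorted]
      congr 1
      have hperm : (sacSq b.2).Perm (b.2.map (fun y => y ^ 2)) := PySem.List.sorted_perm _ _ _
      rw [hperm.countP_eq, List.countP_map]
      have hfun : ((fun y => decide (y < x)) ∘ fun y : Int => y ^ 2)
          = (fun y : Int => decide (x > y * y)) := by
        funext y
        simp only [Function.comp_apply]
        congr 1
        rw [pow_two]
      rw [hfun]
      exact hb2.countP_eq _
    rw [List.map_congr_left (fun x _ => hkey x),
      (ha2.map (fun x => (R.countP (fun y => decide (x > y * y)) : Int))).sum_eq,
      ha1, hb1, pc_append]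
    rfl

lemma sortAndCount_spec :
    ∀ (fuel : Nat) (l : List Int), l.length ≤ fuel →
    (sortAndCount fuel l).2.Perm l ∧ (sortAndCount fuel l).1 = pc l := by
  intro fuel
  induction fuel with
  | zero =>
    intro l h
    have : l = [] := List.eq_nil_of_length_eq_zero (by omega)
    subst this
    exact ⟨List.Perm.refl _, rfl⟩
  | succ fuel ih =>
    intro l h
    by_cases hl : l.length ≤ 1
    · rw [sortAndCount, if_pos hl]
      exact ⟨List.Perm.refl _, (pc_small l hl).symm⟩
    · rw [sortAndCount, if_neg hl]
      have h1 := ih (l.take (l.length / 2)) (by simp [List.length_take]; omega)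
      have h2 := ih (l.drop (l.length / 2)) (by simp [List.length_drop]; omega)
      have := sacCombine_spec _ _ _ _ h1.1 h1.2 h2.1 h2.2
      rwa [List.take_append_drop] at this

def crossBA (s l : List Int) : Int :=
  (l.map (fun x => (s.countP (fun y => decide (y > x * x)) : Int))).sum

lemma sum_ite_sq (x : Int) (t : List Int) :
    (t.map (fun v => if x > v * v then (1 : Int) else 0)).sum
      = (t.countP (fun v => decide (x > v * v)) : Int) := by
  induction t with
  | nil => simp
  | cons v t ih => simp [List.countP_cons, ih]; split_ifs <;> ring

lemma crossBA_snoc (s : List Int) (x : Int) (t : List Int) :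
    crossBA (s ++ [x]) t = crossBA s t + (t.countP (fun z => decide (x > z * z)) : Int) := by
  unfold crossBA
  rw [← sum_ite_sq]
  have hmap : t.map (fun v => ((s ++ [x]).countP (fun y => decide (y > v * v)) : Int))
      = t.map (fun v => (s.countP (fun y => decide (y > v * v)) : Int)
          + (if x > v * v then (1 : Int) else 0)) := by
    apply List.map_congr_left
    intro v _
    simp only [List.countP_append, List.countP_cons, List.countP_nil, decide_eq_true_eq]
    split_ifs <;> push_cast <;> ring
  rw [hmap, ← List.sum_map_add]

lemma bisect_exit_le (l : List Int) (key : Int) (k : Nat) (hk : k ≤ l.length)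
    (hlo : ∀ i (hi : i < l.length), i < k → l[i] ≤ key)
    (hhi : ∀ i (hi : i < l.length), k ≤ i → ¬ l[i] ≤ key) :
    k = l.countP (fun y => decide (y ≤ key)) := by
  symm
  apply countP_eq_of_index_split _ _ _ hk
  intro i hi
  simp only [decide_eq_true_eq]
  constructor
  · intro hp
    by_contra hik
    exact hhi i hi (by omega) hp
  · exact hlo i hi

lemma bSearchLE_spec_aux (l : List Int) (key : Int) (hs : l.Pairwise (· ≤ ·)) :
    ∀ (n lo hi : Nat), hi - lo ≤ n → lo ≤ hi → hi ≤ l.length →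
    (∀ i (hi' : i < l.length), i < lo → l[i] ≤ key) →
    (∀ i (hi' : i < l.length), hi ≤ i → ¬ l[i] ≤ key) →
    bSearchLE n l key lo hi = l.countP (fun y => decide (y ≤ key)) := by
  intro n
  induction n with
  | zero =>
    intro lo hi hf h1 h2 hlo hhi
    have heq : lo = hi := by omega
    exact bisect_exit_le l key lo (by omega) hlo (heq ▸ hhi)
  | succ n ih =>
    intro lo hi hf h1 h2 hlo hhi
    by_cases hlt : lo < hi
    · rw [bSearchLE, if_pos hlt]
      have hmid : (lo + hi) / 2 < l.length := by omega
      rw [List.getD_eq_getElem l 0 hmid]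
      by_cases hcmp : l[(lo + hi) / 2] ≤ key
      · rw [if_pos hcmp]
        apply ih ((lo + hi) / 2 + 1) hi (by omega) (by omega) h2 ?_ hhi
        intro i hi' hilt
        rcases Nat.lt_or_ge i ((lo + hi) / 2) with hc | hc
        · exact (List.pairwise_iff_getElem.mp hs i _ hi' hmid hc).trans hcmp
        · have : i = (lo + hi) / 2 := by omega
          subst this; exact hcmp
      · rw [if_neg hcmp]
        apply ih lo ((lo + hi) / 2) (by omega) (by omega) (by omega) hlo ?_
        intro i hi' hge
        rcases Nat.lt_or_ge ((lo + hi) / 2) i with hc | hc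
        · have := List.pairwise_iff_getElem.mp hs ((lo + hi) / 2) i hmid hi' hc
          omega
        · have : i = (lo + hi) / 2 := by omega
          subst this; omega
    · rw [bSearchLE, if_neg hlt]
      have heq : lo = hi := by omega
      exact bisect_exit_le l key lo (by omega) hlo (heq ▸ hhi)

lemma bSearchLE_spec (l : List Int) (key : Int) (hs : l.Pairwise (· ≤ ·)) :
    bSearchLE l.length l key 0 l.length = l.countP (fun y => decide (y ≤ key)) := by
  apply bSearchLE_spec_aux l key hs l.length 0 l.length (by omega) (by omega) (by omega)
  · intro i hi h; omega
  · intro i hi h; omega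

-- in a sorted list, the elements ≤ x are exactly the first countP (· ≤ x) positions
lemma countP_le_prefix (s : List Int) (x : Int) (hs : s.Pairwise (· ≤ ·)) :
    (∀ i (hi : i < s.length), i < s.countP (fun y => decide (y ≤ x)) → s[i] ≤ x) ∧
    (∀ i (hi : i < s.length), s.countP (fun y => decide (y ≤ x)) ≤ i → x < s[i]) := by
  constructor
  · intro i hi hik
    by_contra hgt
    have hd : (s.drop i).countP (fun y => decide (y ≤ x)) = 0 := by
      rw [List.countP_eq_zero]
      intro y hy
      obtain ⟨j, hj, rfl⟩ := List.mem_iff_getElem.mp hy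
      simp only [List.length_drop] at hj
      simp only [List.getElem_drop, decide_eq_true_eq]
      rcases Nat.eq_zero_or_pos j with rfl | hz
      · simpa using hgt
      · have := List.pairwise_iff_getElem.mp hs i (i + j) hi (by omega) (by omega)
        omega
    have hsplit : s.countP (fun y => decide (y ≤ x))
        = (s.take i).countP (fun y => decide (y ≤ x))
          + (s.drop i).countP (fun y => decide (y ≤ x)) := by
      rw [← List.countP_append, List.take_append_drop]
    have := List.countP_le_length (l := s.take i) (p := fun y => decide (y ≤ x))
    simp only [List.length_take] at this
    omega
  · intro i hi hki
    by_contra hgt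
    have ht : (s.take (i + 1)).countP (fun y => decide (y ≤ x)) = (s.take (i + 1)).length := by
      rw [List.countP_eq_length]
      intro y hy
      obtain ⟨j, hj, rfl⟩ := List.mem_iff_getElem.mp hy
      simp only [List.getElem_take, decide_eq_true_eq]
      have hj' : j < s.length := by simp at hj; omega
      rcases Nat.lt_or_ge j i with hc | hc
      · have := List.pairwise_iff_getElem.mp hs j i hj' hi hc
        omega
      · have : j = i := by simp at hj; omega
        subst this; omega
    have hsplit : s.countP (fun y => decide (y ≤ x))
        = (s.take (i + 1)).countP (fun y => decide (y ≤ x))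
          + (s.drop (i + 1)).countP (fun y => decide (y ≤ x)) := by
      rw [← List.countP_append, List.take_append_drop]
    simp only [List.length_take] at ht
    omega

lemma sorted_insert (s : List Int) (x : Int) (hs : s.Pairwise (· ≤ ·)) :
    (s.take (s.countP (fun y => decide (y ≤ x))) ++
      x :: s.drop (s.countP (fun y => decide (y ≤ x)))).Pairwise (· ≤ ·) := by
  obtain ⟨h1, h2⟩ := countP_le_prefix s x hs
  have hsp : ((s.take (s.countP (fun y => decide (y ≤ x)))) ++
      (s.drop (s.countP (fun y => decide (y ≤ x))))).Pairwise (· ≤ ·) := by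
    rwa [List.take_append_drop]
  obtain ⟨hta, hdr, hcross⟩ := List.pairwise_append.mp hsp
  have hbefore : ∀ y ∈ s.take (s.countP (fun y => decide (y ≤ x))), y ≤ x := by
    intro y hy
    obtain ⟨j, hj, rfl⟩ := List.mem_iff_getElem.mp hy
    simp only [List.length_take] at hj
    rw [List.getElem_take]
    exact h1 j (by omega) (by omega)
  have hafter : ∀ y ∈ s.drop (s.countP (fun y => decide (y ≤ x))), x ≤ y := by
    intro y hy
    obtain ⟨j, hj, rfl⟩ := List.mem_iff_getElem.mp hy
    simp only [List.length_drop] at hj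
    rw [List.getElem_drop]
    exact (h2 _ (by omega) (by omega)).le
  refine List.pairwise_append.mpr ⟨hta, List.pairwise_cons.mpr ⟨hafter, hdr⟩, ?_⟩
  intro a ha b hb
  rcases List.mem_cons.mp hb with rfl | hb'
  · exact hbefore a ha
  · exact hcross a ha b hb'

lemma perm_insert_at (s : List Int) (x : Int) (k : Nat) :
    (s.take k ++ x :: s.drop k).Perm (x :: s) := by
  have h := List.perm_middle (a := x) (l₁ := s.take k) (l₂ := s.drop k)
  rwa [List.take_append_drop] at h

lemma crossBA_congr (s s' t : List Int) (h : s.Perm s') : crossBA s t = crossBA s' t := by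
  unfold crossBA
  exact congrArg List.sum (List.map_congr_left (fun v _ => by rw [h.countP_eq]))

lemma decide_not_le (q y : Int) : (decide ¬(decide (y ≤ q) = true)) = decide (y > q) := by
  by_cases h : y ≤ q <;> simp [h] <;> omega

lemma foldB_spec :
    ∀ (l : List Int) (c : Int) (s : List Int), s.Pairwise (· ≤ ·) →
    (l.foldl
      (fun (st : Int × List Int) x =>
        (st.1 + ((st.2.length - bSearchLE st.2.length st.2 (x * x) 0 st.2.length : Nat) : Int),
         PySem.List.insert st.2 ((bSearchLE st.2.length st.2 x 0 st.2.length : Nat) : Int) x))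
      (c, s)).1 = c + crossBA s l + pc l := by
  intro l
  induction l with
  | nil => intro c s hs; simp [crossBA, pc]
  | cons x t ih =>
    intro c s hs
    simp only [List.foldl_cons]
    have hkx : s.countP (fun y => decide (y ≤ x)) ≤ s.length := List.countP_le_length
    rw [bSearchLE_spec s (x * x) hs, bSearchLE_spec s x hs,
      PySem.List.insert_natCast s _ x hkx,
      ih _ _ (sorted_insert s x hs),
      crossBA_congr _ _ t ((perm_insert_at s x _).trans (List.perm_append_singleton x s).symm),
      crossBA_snoc]
    have hsplit := List.length_eq_countP_add_countP (fun y => decide (y ≤ x * x)) (l := s)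
    have hGT : s.countP (fun a => decide ¬(decide (a ≤ x * x) = true))
        = s.countP (fun y => decide (y > x * x)) :=
      List.countP_congr (fun a _ => by rw [decide_not_le (x * x) a])
    rw [hGT] at hsplit
    simp only [pc, crossBA, List.map_cons, List.sum_cons]
    omega

-- ===== VERDICT (by name: the statement is the Claim_ definition above) =====
theorem special_inversion_counter_spec : Claim_equal_special_inversion_counter := by
  intro array _
  unfold Spec_special_inversion_counter special_inversion_counter special_inversion_counter_alt
  rw [(sortAndCount_spec array.length array (le_refl _)).2, foldB_spec array 0 [] List.Pairwise.nil]
  simp [crossBA]
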